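-- pv_equiv track=rewrite | github.com/sofienealouini/advent-of-code-2020 | solutions/python/day_16.py | assign_one_position_to_each_field
-- ===== SOURCE A (Python) =====
-- from typing import Tuple, List, Dict, Set
--
-- def assign_one_position_to_each_field(possible_fields_by_position: Dict[int, Set[str]],
--                                       field_positions: Dict[str, int]) -> Dict[str, int]:
--     if len(possible_fields_by_position) == 0:
--         return field_positions
--     else:
--         for pos in possible_fields_by_position:
--             possible_fields_for_pos = possible_fields_by_position[pos]
--             if len(possible_fields_for_pos) == 1:
--                 identified_field: str = list(possible_fields_for_pos)[0]
--                 field_positions[identified_field] = pos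
--                 possible_fields_by_position = remove_key_from_mapping(pos, possible_fields_by_position)
--                 possible_fields_by_position = remove_value_from_mapping(identified_field, possible_fields_by_position)
--                 return assign_one_position_to_each_field(possible_fields_by_position, field_positions)
--
-- def remove_key_from_mapping(key_to_remove: int, mapping: Dict[int, Set[str]]) -> Dict[int, Set[str]]:
--     return {key: mapping[key] for key in mapping if key != key_to_remove}
--
-- def remove_value_from_mapping(value_to_remove: str, mapping: Dict[int, Set[str]]) -> Dict[int, Set[str]]:
--     for pos in mapping:
--         mapping[pos] = mapping[pos].difference([value_to_remove])
--     return mapping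
-- ===== SOURCE B (Python) =====
-- def assign_one_position_to_each_field(possible_fields_by_position, field_positions):
--     # Iterative elimination over a mutable state with a static field->positions index:
--     # each round scans the remaining positions once for a singleton and then removes the
--     # identified field only from the positions that actually contain it, instead of
--     # rebuilding the whole mapping and filtering every set on every round.
--     # Like A, mutates field_positions in place.
--     active = list(possible_fields_by_position)
--     sets = {pos: set(fields) for pos, fields in possible_fields_by_position.items()}
--     index = {}
--     for pos, s in sets.items():
--         for f in s:
--             index.setdefault(f, []).append(pos)
--     while active:
--         pos = None
--         for p in active:
--             if len(sets[p]) == 1: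
--                 pos = p
--                 break
--         if pos is None:
--             return None
--         f = next(iter(sets[pos]))
--         field_positions[f] = pos
--         active.remove(pos)
--         for q in index[f]:
--             sets[q].discard(f)
--     return field_positions
-- ===== Notes on version B (the rewrite author's own statement) =====
-- stated objective: alternative
-- what changed: A recursively rebuilds the whole mapping and scans every remaining set on each round; B runs one iterative loop over a mutable state with a static field->positions index built once, so each round only scans for a singleton and removes the identified field from the positions that actually contain it.
import Mathlib
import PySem

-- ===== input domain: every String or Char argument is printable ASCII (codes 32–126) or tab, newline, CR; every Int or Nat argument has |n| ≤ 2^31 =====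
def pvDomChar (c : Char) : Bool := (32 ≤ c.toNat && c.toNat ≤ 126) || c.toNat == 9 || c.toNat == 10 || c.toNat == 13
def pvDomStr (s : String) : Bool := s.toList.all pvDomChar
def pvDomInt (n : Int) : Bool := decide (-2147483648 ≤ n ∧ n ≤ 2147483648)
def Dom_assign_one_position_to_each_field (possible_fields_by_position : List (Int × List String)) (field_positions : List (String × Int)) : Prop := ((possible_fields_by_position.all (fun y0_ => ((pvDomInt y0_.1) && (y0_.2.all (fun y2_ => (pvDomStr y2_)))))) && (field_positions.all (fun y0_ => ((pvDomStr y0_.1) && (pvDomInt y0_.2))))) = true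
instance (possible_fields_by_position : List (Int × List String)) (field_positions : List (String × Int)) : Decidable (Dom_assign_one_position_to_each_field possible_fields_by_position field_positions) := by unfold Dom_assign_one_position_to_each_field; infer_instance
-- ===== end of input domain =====

-- B replaces A's rebuild-the-whole-dict recursion by one iterative elimination loop over a
-- mutable state with a static field->positions index, so each round touches only the affected
-- positions instead of rebuilding and rescanning the whole mapping (objective: alternative).
-- Both Pythons mutate field_positions in place; the equivalence is about the return value.


-- ===== PORT A =====
-- termination helper for the port of A (cited in its decreasing_by)
lemma pv_filter_attach_lt (m : List (Int × List String)) (pos : Int) (s : List String)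
    (h : (pos, s) ∈ m) :
    (List.filter (fun (x : {e // e ∈ m}) => x.val.1 != pos) m.attach).length < m.length := by
  have hlt : (List.filter (fun (x : {e // e ∈ m}) => x.val.1 != pos) m.attach).length
      < m.attach.length := by
    apply List.length_filter_lt_length_iff_exists.mpr
    exact ⟨⟨(pos, s), h⟩, List.mem_attach _ _, by simp⟩
  simpa using hlt

-- Literal port of A's recursion.  The mapping dict is its association list (keys unique under
-- Pre_), the sets are their distinct-element lists, field_positions is a PySem.Dict.
-- 'for pos in dict: if len(dict[pos]) == 1: … return recurse' = find? of the first entry whose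
-- value has length 1 (exact under unique keys); falling off the loop returns Python None = none.
-- remove_key_from_mapping = filter on the key; remove_value_from_mapping = Set.discard on every
-- value; list(s)[0] of a singleton set = its head (the '[] => none' branch is unreachable:
-- the found value has length 1).
def assignA_go (m : List (Int × List String)) (fp : PySem.Dict String Int) : Option (List (String × Int)) :=
  if m.length = 0 then some fp.items
  else
    match hf : m.find? (fun e => e.2.length == 1) with
    | none => none
    | some (pos, s) =>
      match s with
      | [] => none
      | f :: _ =>
        assignA_go ((m.filter (fun e => e.1 != pos)).map (fun e => (e.1, PySem.Set.discard e.2 f)))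
          (fp.insert f pos)
termination_by m.length
decreasing_by
  simp only [List.length_map]
  rename_i tl
  exact pv_filter_attach_lt m pos (f :: tl) (List.mem_of_find?_eq_some hf)

def assign_one_position_to_each_field (possible_fields_by_position : List (Int × List String)) (field_positions : List (String × Int)) : Option (List (String × Int)) :=
  assignA_go possible_fields_by_position (PySem.Dict.mk field_positions)

-- ===== PORT B =====
-- Literal port of Source B's while-loop.  active = list of the remaining positions, sets = the
-- evolving dict of candidate sets, index = the static field -> positions dict.  'sets[p]' is
-- getD with default [] (p is always a key, so the default is never used); 'active.remove(pos)'
-- removes the first occurrence = List.erase; 'sets[q].discard(f)' = Dict.modify with Set.discard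
-- (q is always a key of sets).  The '[] => none' branch is unreachable: the found set has length 1.
def loopB (index : PySem.Dict String (List Int)) (active : List Int)
    (sets : PySem.Dict Int (List String)) (fp : PySem.Dict String Int) :
    Option (List (String × Int)) :=
  if active.isEmpty then some fp.items
  else
    match hf : active.find? (fun p => (PySem.Dict.getD sets p []).length == 1) with
    | none => none
    | some pos =>
      match PySem.Dict.getD sets pos [] with
      | [] => none
      | f :: _ =>
        loopB index (active.erase pos)
          ((PySem.Dict.getD index f []).foldl
            (fun st q => st.modify q [] (fun s => PySem.Set.discard s f)) sets)
          (fp.insert f pos)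
termination_by active.length
decreasing_by
  have hm := List.mem_of_find?_eq_some hf
  have h1 := List.length_erase_of_mem hm
  have h2 := List.length_pos_of_mem hm
  omega

def assign_one_position_to_each_field_alt (possible_fields_by_position : List (Int × List String)) (field_positions : List (String × Int)) : Option (List (String × Int)) :=
  let active := possible_fields_by_position.map (fun e => e.1)
  let sets := possible_fields_by_position.foldl
    (fun d e => d.insert e.1 (PySem.Set.ofList e.2)) PySem.Dict.empty
  let index := sets.items.foldl
    (fun ix e => e.2.foldl (fun ix f => ix.modify f [] (fun l => l ++ [e.1])) ix)
    PySem.Dict.empty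
  loopB index active sets (PySem.Dict.mk field_positions)

-- ===== PRECONDITION & SPEC =====
-- Pre_ only requires the association-list/set-list arguments to be faithful images of Python
-- dict/set values: no duplicate dict keys and no duplicate set elements (a list with duplicates
-- does not represent any input of the Python function, whose arguments are a dict of sets and a
-- dict).
def Pre_assign_one_position_to_each_field (possible_fields_by_position : List (Int × List String)) (field_positions : List (String × Int)) : Prop :=
  (possible_fields_by_position.map Prod.fst).Nodup ∧
  (∀ e ∈ possible_fields_by_position, e.2.Nodup) ∧
  (field_positions.map Prod.fst).Nodup
instance (possible_fields_by_position : List (Int × List String)) (field_positions : List (String × Int)) : Decidable (Pre_assign_one_position_to_each_field possible_fields_by_position field_positions) := by unfold Pre_assign_one_position_to_each_field; infer_instance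

def pvWitness_assign_one_position_to_each_field : (List (Int × List String)) × (List (String × Int)) :=
  ([(0, ["a", "b"]), (1, ["b"])], [("c", 5)])

def Spec_assign_one_position_to_each_field (possible_fields_by_position : List (Int × List String)) (field_positions : List (String × Int)) (out : Option (List (String × Int))) : Prop := out = assign_one_position_to_each_field_alt possible_fields_by_position field_positions
instance (possible_fields_by_position : List (Int × List String)) (field_positions : List (String × Int)) (out : Option (List (String × Int))) : Decidable (Spec_assign_one_position_to_each_field possible_fields_by_position field_positions out) := by unfold Spec_assign_one_position_to_each_field; infer_instance

-- ===== CLAIM (what is proved, stated in full; the proofs are below) =====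
def Claim_equal_assign_one_position_to_each_field : Prop := ∀ (possible_fields_by_position : List (Int × List String)) (field_positions : List (String × Int)), Dom_assign_one_position_to_each_field possible_fields_by_position field_positions → Pre_assign_one_position_to_each_field possible_fields_by_position field_positions → Spec_assign_one_position_to_each_field possible_fields_by_position field_positions (assign_one_position_to_each_field possible_fields_by_position field_positions)

-- ===== LEMMAS AND PROOFS =====

-- discard is idempotent and a no-op when the element is absent
lemma discard_discard (s : List String) (f : String) :
    PySem.Set.discard (PySem.Set.discard s f) f = PySem.Set.discard s f := by
  unfold PySem.Set.discard
  rw [List.filter_filter]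
  simp

lemma discard_of_not_mem (s : List String) (f : String) (h : f ∉ s) :
    PySem.Set.discard s f = s := by
  refine List.filter_eq_self.mpr fun a ha => ?_
  simp only [Bool.not_eq_eq_eq_not, Bool.not_true, beq_eq_false_iff_ne, ne_eq]
  rintro rfl
  exact h ha

-- the B-side update loop, characterised pointwise
lemma getD_foldl_discard (L : List Int) (sets : PySem.Dict Int (List String)) (f : String) (p : Int) :
    PySem.Dict.getD (L.foldl (fun st q => st.modify q [] (fun s => PySem.Set.discard s f)) sets) p []
      = if p ∈ L then PySem.Set.discard (PySem.Dict.getD sets p []) f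
        else PySem.Dict.getD sets p [] := by
  induction L generalizing sets with
  | nil => simp
  | cons q rest ih =>
    simp only [List.foldl_cons, List.mem_cons]
    rw [ih, PySem.Dict.getD_modify]
    by_cases hpq : p = q <;> by_cases hpr : p ∈ rest <;>
      simp [hpq, hpr, discard_discard]

-- the index-building folds: membership facts
lemma idx_inner_mono (s : List String) (pos : Int) (ix : PySem.Dict String (List Int))
    (f : String) (x : Int) (h : x ∈ PySem.Dict.getD ix f []) :
    x ∈ PySem.Dict.getD (s.foldl (fun ix g => ix.modify g [] (fun l => l ++ [pos])) ix) f [] := by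
  induction s generalizing ix with
  | nil => simpa using h
  | cons g rest ih =>
    simp only [List.foldl_cons]
    apply ih
    rw [PySem.Dict.getD_modify]
    split
    · next hfg => subst hfg; exact List.mem_append_left _ h
    · exact h

lemma idx_inner_self (s : List String) (pos : Int) (ix : PySem.Dict String (List Int))
    (f : String) (h : f ∈ s) :
    pos ∈ PySem.Dict.getD (s.foldl (fun ix g => ix.modify g [] (fun l => l ++ [pos])) ix) f [] := by
  induction s generalizing ix with
  | nil => simp at h
  | cons g rest ih =>
    simp only [List.foldl_cons]
    rcases List.mem_cons.mp h with rfl | hf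
    · apply idx_inner_mono
      rw [PySem.Dict.getD_modify]
      simp
    · exact ih _ hf

lemma idx_outer_mono (L : List (Int × List String)) (ix : PySem.Dict String (List Int))
    (f : String) (x : Int) (h : x ∈ PySem.Dict.getD ix f []) :
    x ∈ PySem.Dict.getD
      (L.foldl (fun ix e => e.2.foldl (fun ix f => ix.modify f [] (fun l => l ++ [e.1])) ix) ix)
      f [] := by
  induction L generalizing ix with
  | nil => simpa using h
  | cons e rest ih =>
    simp only [List.foldl_cons]
    exact ih _ (idx_inner_mono _ _ _ _ _ h)

lemma idx_outer_self (L : List (Int × List String)) (ix : PySem.Dict String (List Int))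
    (pos : Int) (s : List String) (f : String) (hmem : (pos, s) ∈ L) (hf : f ∈ s) :
    pos ∈ PySem.Dict.getD
      (L.foldl (fun ix e => e.2.foldl (fun ix f => ix.modify f [] (fun l => l ++ [e.1])) ix) ix)
      f [] := by
  induction L generalizing ix with
  | nil => simp at hmem
  | cons e rest ih =>
    simp only [List.foldl_cons]
    rcases List.mem_cons.mp hmem with rfl | hmem'
    · exact idx_outer_mono rest _ _ _ (idx_inner_self _ _ _ _ hf)
    · exact ih _ hmem'

-- the initial sets dict of B
lemma sets0_items (l : List (Int × List String)) (hnd : (l.map Prod.fst).Nodup) :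
    (l.foldl (fun d e => d.insert e.1 (PySem.Set.ofList e.2)) PySem.Dict.empty).items
      = l.map (fun e => (e.1, PySem.Set.ofList e.2)) := by
  have h := PySem.Dict.items_foldl_insert_fresh l (fun e => e.1) (fun e => PySem.Set.ofList e.2)
    PySem.Dict.empty (fun a _ => by simp) (by simpa using hnd)
  simpa using h

lemma sets0_getD (l : List (Int × List String)) (hnd : (l.map Prod.fst).Nodup)
    {k : Int} {v : List String} (hm : (k, v) ∈ l) :
    PySem.Dict.getD (l.foldl (fun d e => d.insert e.1 (PySem.Set.ofList e.2)) PySem.Dict.empty) k []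
      = PySem.Set.ofList v := by
  apply PySem.Dict.getD_of_mem_items
  · rw [sets0_items l hnd]
    exact List.mem_map.mpr ⟨(k, v), hm, rfl⟩
  · simp only [PySem.Dict.keys, sets0_items l hnd, List.map_map]
    simpa using hnd

-- one-step unfoldings of the two ports (plain matches, for the simulation proof)
lemma assignA_go_step (m : List (Int × List String)) (fp : PySem.Dict String Int)
    (hne : ¬ m.length = 0) :
    assignA_go m fp =
      match m.find? (fun e => e.2.length == 1) with
      | none => none
      | some (pos, s) =>
        match s with
        | [] => none
        | f :: _ =>
          assignA_go ((m.filter (fun e => e.1 != pos)).map (fun e => (e.1, PySem.Set.discard e.2 f)))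
            (fp.insert f pos) := by
  rw [assignA_go.eq_def, if_neg hne]
  split <;> rename_i heq <;> simp only [heq] <;>
    first
    | rfl
    | (rename_i pos s; cases s <;> rfl)

lemma loopB_step (index : PySem.Dict String (List Int)) (active : List Int)
    (sets : PySem.Dict Int (List String)) (fp : PySem.Dict String Int)
    (hne : active.isEmpty = false) :
    loopB index active sets fp =
      match active.find? (fun p => (PySem.Dict.getD sets p []).length == 1) with
      | none => none
      | some pos =>
        match PySem.Dict.getD sets pos [] with
        | [] => none
        | f :: _ =>
          loopB index (active.erase pos)
            ((PySem.Dict.getD index f []).foldl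
              (fun st q => st.modify q [] (fun s => PySem.Set.discard s f)) sets)
            (fp.insert f pos) := by
  rw [loopB.eq_def, hne]
  simp only [Bool.false_eq_true, if_false]
  split <;> rename_i heq <;> simp only [heq]

-- the main simulation: A's remaining mapping is B's (active, sets) state
lemma loop_eq (index : PySem.Dict String (List Int)) :
    ∀ (n : Nat) (active : List Int), active.length = n →
    ∀ (sets : PySem.Dict Int (List String)) (fp : PySem.Dict String Int)
      (m : List (Int × List String)),
    active.Nodup →
    m = active.map (fun p => (p, PySem.Dict.getD sets p [])) →
    (∀ p ∈ active, ∀ f ∈ PySem.Dict.getD sets p [], p ∈ PySem.Dict.getD index f []) →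
    assignA_go m fp = loopB index active sets fp := by
  intro n
  induction n using Nat.strong_induction_on with
  | _ n ih =>
    intro active hlen sets fp m hnd hm hidx
    by_cases hempty : active = []
    · subst hempty
      simp only [List.map_nil] at hm
      subst hm
      rw [assignA_go.eq_def, loopB.eq_def]
      rfl
    · have hmlen : ¬ m.length = 0 := by
        subst hm
        simp only [List.length_map, List.length_eq_zero_iff]
        exact hempty
      have hbne : active.isEmpty = false := by
        simpa [List.isEmpty_iff] using hempty
      rw [assignA_go_step m fp hmlen, loopB_step index active sets fp hbne]
      have hfind : m.find? (fun e => e.2.length == 1)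
          = Option.map (fun p => (p, PySem.Dict.getD sets p []))
              (active.find? (fun p => (PySem.Dict.getD sets p []).length == 1)) := by
        rw [hm, List.find?_map]
        rfl
      rw [hfind]
      cases hf : active.find? (fun p => (PySem.Dict.getD sets p []).length == 1) with
      | none => rfl
      | some pos =>
        simp only [Option.map_some]
        cases hset : PySem.Dict.getD sets pos [] with
        | nil => rfl
        | cons f rest =>
          have hpos : pos ∈ active := List.mem_of_find?_eq_some hf
          have hlt : (active.erase pos).length < n := by
            have h1 := List.length_erase_of_mem hpos
            have h2 := List.length_pos_of_mem hpos
            omega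
          have herase : active.erase pos = active.filter (fun x => x != pos) :=
            hnd.erase_eq_filter pos
          have hsets' : ∀ p ∈ active.erase pos,
              PySem.Dict.getD ((PySem.Dict.getD index f []).foldl
                (fun st q => st.modify q [] (fun s => PySem.Set.discard s f)) sets) p []
              = PySem.Set.discard (PySem.Dict.getD sets p []) f := by
            intro p hp
            have hpa : p ∈ active := List.mem_of_mem_erase hp
            rw [getD_foldl_discard]
            by_cases hfp : f ∈ PySem.Dict.getD sets p []
            · rw [if_pos (hidx p hpa f hfp)]
            · rw [discard_of_not_mem _ _ hfp]
              split <;> rfl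
          have hm' : (m.filter (fun e => e.1 != pos)).map (fun e => (e.1, PySem.Set.discard e.2 f))
              = (active.erase pos).map (fun p => (p, PySem.Dict.getD
                  ((PySem.Dict.getD index f []).foldl
                    (fun st q => st.modify q [] (fun s => PySem.Set.discard s f)) sets) p [])) := by
            rw [hm, List.filter_map, List.map_map]
            have hlist : List.filter ((fun (e : Int × List String) => e.1 != pos) ∘
                (fun p => (p, PySem.Dict.getD sets p []))) active = active.erase pos := by
              rw [herase]
              exact List.filter_congr fun x _ => rfl
            rw [hlist]
            apply List.map_congr_left
            intro p hp
            show (p, PySem.Set.discard (PySem.Dict.getD sets p []) f) = _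
            rw [hsets' p hp]
          have hidx' : ∀ p ∈ active.erase pos,
              ∀ f' ∈ PySem.Dict.getD ((PySem.Dict.getD index f []).foldl
                (fun st q => st.modify q [] (fun s => PySem.Set.discard s f)) sets) p [],
              p ∈ PySem.Dict.getD index f' [] := by
            intro p hp f' hf'
            have hpa : p ∈ active := List.mem_of_mem_erase hp
            rw [hsets' p hp] at hf'
            exact hidx p hpa f' ((PySem.Set.mem_discard _ _ _).mp hf').1
          exact ih _ hlt _ rfl _ _ _ (hnd.erase _) hm' hidx'

-- ===== VERDICT (by name: the statement is the Claim_ definition above) =====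
theorem assign_one_position_to_each_field_spec : Claim_equal_assign_one_position_to_each_field := by
  intro pfbp fp _hdom hpre
  obtain ⟨hk, hv, -⟩ := hpre
  unfold Spec_assign_one_position_to_each_field
  unfold assign_one_position_to_each_field assign_one_position_to_each_field_alt
  dsimp only
  have hgetD : ∀ e ∈ pfbp,
      PySem.Dict.getD (pfbp.foldl (fun d e => d.insert e.1 (PySem.Set.ofList e.2)) PySem.Dict.empty) e.1 []
        = e.2 := by
    intro e he
    rw [sets0_getD pfbp hk (show (e.1, e.2) ∈ pfbp by simpa using he)]
    exact PySem.Set.ofList_eq_self_of_nodup _ (hv e he)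
  apply loop_eq _ (pfbp.map (fun e => e.1)).length _ rfl
  · simpa using hk
  · rw [List.map_map]
    have : ∀ e ∈ pfbp, ((fun p => (p, PySem.Dict.getD (pfbp.foldl
        (fun d e => d.insert e.1 (PySem.Set.ofList e.2)) PySem.Dict.empty) p [])) ∘
        (fun (e : Int × List String) => e.1)) e = e := by
      intro e he
      simp only [Function.comp_apply]
      rw [hgetD e he]
    calc pfbp = pfbp.map id := (List.map_id pfbp).symm
      _ = _ := (List.map_congr_left fun e he => (this e he).symm)
  · intro p hp f hf
    obtain ⟨e, he, rfl⟩ := List.mem_map.mp hp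
    rw [sets0_getD pfbp hk (show (e.1, e.2) ∈ pfbp by simpa using he)] at hf
    apply idx_outer_self _ _ e.1 (PySem.Set.ofList e.2) f _ hf
    rw [sets0_items pfbp hk]
    exact List.mem_map.mpr ⟨e, he, rfl⟩
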